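-- pv_equiv track=rewrite | github.com/kenfzhang/static-site-gen | src/markdown_blocks.py | is_heading
-- ===== SOURCE A (Python) =====
-- def is_heading(block):
--     pounds = 0
--     for i in block:
--         if pounds >= 1 and pounds <= 6 and i == ' ':
--             return True
--         if i == '#':
--             pounds += 1
--             continue
--         else:
--             return False
--     return False
-- ===== SOURCE B (Python) =====
-- def is_heading(block):
--     return any(block.startswith("#" * k + " ") for k in range(1, 7))
-- ===== Notes on version B (the rewrite author's own statement) =====
-- stated objective: idiomatic
-- what changed: Replaced the character-by-character scanning loop with its pound counter by a single prefix-pattern test: any of the six admissible heading prefixes (k pound signs then a space, k = 1..6) being a prefix of the block.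
import Mathlib
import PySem

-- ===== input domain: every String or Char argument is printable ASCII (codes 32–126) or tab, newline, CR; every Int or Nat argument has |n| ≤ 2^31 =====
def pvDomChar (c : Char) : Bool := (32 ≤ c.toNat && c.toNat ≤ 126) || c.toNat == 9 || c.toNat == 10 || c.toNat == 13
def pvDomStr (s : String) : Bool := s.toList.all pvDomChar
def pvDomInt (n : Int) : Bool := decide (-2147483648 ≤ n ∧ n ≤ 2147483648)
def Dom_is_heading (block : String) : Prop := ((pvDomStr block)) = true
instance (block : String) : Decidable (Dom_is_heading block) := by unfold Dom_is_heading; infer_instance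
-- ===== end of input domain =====

-- B replaces A's character-by-character counting loop with a prefix-pattern test:
-- any('#'*k + ' ' is a prefix, for k in 1..6). Objective: idiomatic.

-- ===== PORT A =====
-- the for-loop over the string with the 'pounds' accumulator
def isHeadingLoop : List Char → Nat → Bool
  | [], _ => false
  | c :: rest, pounds =>
    if 1 ≤ pounds ∧ pounds ≤ 6 ∧ c = ' ' then true
    else if c = '#' then isHeadingLoop rest (pounds + 1)
    else false

def is_heading (block : String) : Bool := isHeadingLoop block.toList 0

-- ===== PORT B =====
-- any(block.startswith("#" * k + " ") for k in range(1, 7))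
def is_heading_alt (block : String) : Bool :=
  (PySem.List.pyRange 1 7 1).any
    (fun k => PySem.Chars.startswith block.toList (List.replicate k.toNat '#' ++ [' ']))

-- ===== PRECONDITION & SPEC =====
def Spec_is_heading (block : String) (out : Bool) : Prop := out = is_heading_alt block
instance (block : String) (out : Bool) : Decidable (Spec_is_heading block out) := by unfold Spec_is_heading; infer_instance

-- ===== CLAIM (what is proved, stated in full; the proofs are below) =====
def Claim_equal_is_heading : Prop := ∀ (block : String), Dom_is_heading block → Spec_is_heading block (is_heading block)

-- ===== LEMMAS AND PROOFS =====

-- A's loop on a suffix, having already consumed p pounds, succeeds iff some k more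
-- pounds followed by a space form a prefix of the suffix, with p + k in 1..6.
theorem isHeadingLoop_iff (cs : List Char) (p : Nat) :
    isHeadingLoop cs p = true ↔
      ∃ k : Nat, 1 ≤ p + k ∧ p + k ≤ 6 ∧ (List.replicate k '#' ++ [' ']) <+: cs := by
  induction cs generalizing p with
  | nil =>
    simp only [isHeadingLoop]
    constructor
    · intro h; exact absurd h (by decide)
    · rintro ⟨k, -, -, h⟩
      have := h.length_le
      simp at this
  | cons c cs ih =>
    simp only [isHeadingLoop]
    split_ifs with h1 h2
    · -- 1 ≤ p ∧ p ≤ 6 ∧ c = ' '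
      obtain ⟨hp1, hp2, hc⟩ := h1
      simp only [true_iff]
      exact ⟨0, by omega, by omega, by simp [hc]⟩
    · -- c = '#'
      subst h2
      rw [ih]
      constructor
      · rintro ⟨k, hk1, hk2, hpre⟩
        obtain ⟨t, ht⟩ := hpre
        exact ⟨k + 1, by omega, by omega, ⟨t, by simp [List.replicate_succ, ht]⟩⟩
      · rintro ⟨k, hk1, hk2, hpre⟩
        cases k with
        | zero =>
          exfalso
          obtain ⟨t, ht⟩ := hpre
          simp only [List.replicate, List.nil_append, List.cons_append,
            List.cons.injEq] at ht
          exact h1 ⟨by omega, by omega, ht.1.symm⟩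
        | succ k =>
          refine ⟨k, by omega, by omega, ?_⟩
          obtain ⟨t, ht⟩ := hpre
          rw [List.replicate_succ] at ht
          simp only [List.cons_append, List.cons.injEq] at ht
          exact ⟨t, ht.2⟩
    · -- c ≠ '#' (and not the space case)
      simp only [false_iff]
      rintro ⟨k, hk1, hk2, hpre⟩
      obtain ⟨t, ht⟩ := hpre
      cases k with
      | zero =>
        simp at ht
        exact h1 ⟨by omega, by omega, ht.1.symm⟩
      | succ k =>
        rw [List.replicate_succ] at ht
        simp only [List.cons_append, List.cons.injEq] at ht
        exact h2 ht.1.symm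

theorem is_heading_alt_iff (block : String) :
    is_heading_alt block = true ↔
      ∃ k : Nat, 1 ≤ 0 + k ∧ 0 + k ≤ 6 ∧ (List.replicate k '#' ++ [' ']) <+: block.toList := by
  unfold is_heading_alt
  rw [List.any_eq_true]
  constructor
  · rintro ⟨x, hx, hf⟩
    rw [PySem.List.mem_pyRange_one] at hx
    rw [PySem.Chars.startswith_iff] at hf
    exact ⟨x.toNat, by omega, by omega, hf⟩
  · rintro ⟨k, hk1, hk2, hpre⟩
    refine ⟨(k : Int), ?_, ?_⟩
    · rw [PySem.List.mem_pyRange_one]; omega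
    · rw [PySem.Chars.startswith_iff]
      simpa using hpre

-- ===== VERDICT (by name: the statement is the Claim_ definition above) =====
theorem is_heading_spec : Claim_equal_is_heading := by
  intro block _
  unfold Spec_is_heading is_heading
  rw [Bool.eq_iff_iff, isHeadingLoop_iff, is_heading_alt_iff]
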